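/- GENERATED by mk_final_copies.py from the proof of the farm's unit `vorbis_decode_packet_rest.4d` (farm:vorbis_decode_packet_rest.4d.1: Proof.lean) as the
   re-elaboration sweep compiled it — do not edit. -/
import Asan.CheckWalk
import Vorbis.Spec.Units.vorbis_decode_packet_rest_4d
import Vorbis.Spec.Worked.vorbis_decode_packet_rest_4d_Lemmas

open X86 X86.User Asan Vorbis Vorbis.Spec Vorbis.Spec.vorbis_decode_packet_rest

/-- Segment .4d of `vorbis_decode_packet_rest` (0x110cad … 0x110ce2): the translation step of DECODE (`c->sorted_values[var]` for a sparse book), from `At4d` to `At4e`: lemma `segD` of Lemmas.lean (the farm worker's sub-segment D). -/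
theorem Vorbis.Spec.Worked.vorbis_decode_packet_rest_4d_ok : Vorbis.Spec.vorbis_decode_packet_rest_4d.Statement := by
  intro Lay hLay μ hμ u₀ hcode hl1 hl8 hl4
  exact Vorbis.Spec.vorbis_decode_packet_rest_4d.segD hLay hμ hcode hl1 hl8 hl4
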